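-- pv_equiv track=rewrite | github.com/M-Myron/HQ-Face-Dataset | script/get_bbox_hp.py | get_arm_label
-- ===== SOURCE A (Python) =====
-- import itertools
--
-- def get_arm_label(labels):
--     len_list = []
--     for k, v in itertools.groupby(labels):
--         if k == 1:
--             len_list.append(len(list(v)))
--     if len_list:
--         if max(len_list) >= 2:
--             return 1
--         else:
--             return 0
--     else:
--         return 0
-- ===== SOURCE B (Python) =====
-- def get_arm_label(labels):
--     prev = None
--     for x in labels:
--         if prev == 1 and x == 1:
--             return 1
--         prev = x
--     return 0
-- ===== Notes on version B (the rewrite author's own statement) =====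
-- stated objective: simpler
-- what changed: Replaces the groupby run-length table plus max with a single early-exit pass that remembers the previous element and returns 1 at the first two adjacent 1s.
import Mathlib
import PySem

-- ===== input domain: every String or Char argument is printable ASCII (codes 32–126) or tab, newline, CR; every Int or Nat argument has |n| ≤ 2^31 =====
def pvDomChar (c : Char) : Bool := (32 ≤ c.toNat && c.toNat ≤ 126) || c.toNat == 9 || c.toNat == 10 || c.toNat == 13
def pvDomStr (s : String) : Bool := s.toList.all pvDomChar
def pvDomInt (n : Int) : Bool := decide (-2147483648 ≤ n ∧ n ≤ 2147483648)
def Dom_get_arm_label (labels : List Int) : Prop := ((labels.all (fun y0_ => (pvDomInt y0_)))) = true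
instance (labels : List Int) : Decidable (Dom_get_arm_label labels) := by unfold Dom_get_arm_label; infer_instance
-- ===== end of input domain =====

-- B replaces A's groupby run-length table + max with one early-exit pass over adjacent pairs (objective: simpler).

-- ===== PORT A =====
-- itertools.groupby(labels) as a list of (key, run length) pairs, in order
def pyGroupby : List Int → List (Int × Nat)
  | [] => []
  | x :: xs =>
    match pyGroupby xs with
    | [] => [(x, 1)]
    | (k, n) :: rest => if x = k then (k, n + 1) :: rest else (x, 1) :: (k, n) :: rest

def get_arm_label (labels : List Int) : Int :=
  -- len_list: for k, v in groupby(labels): if k == 1: len_list.append(len(list(v)))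
  let len_list : List Nat :=
    (pyGroupby labels).foldl (fun acc kv => if kv.1 = 1 then acc ++ [kv.2] else acc) []
  -- if len_list: if max(len_list) >= 2: return 1 else 0; else 0
  match len_list with
  | [] => 0
  | h :: t => if 2 ≤ t.foldl Nat.max h then 1 else 0

-- ===== PORT B =====
-- one pass remembering the previous element; return 1 at the first adjacent pair of 1s
def altLoop : Option Int → List Int → Int
  | _, [] => 0
  | prev, x :: xs => if prev = some 1 ∧ x = 1 then 1 else altLoop (some x) xs

def get_arm_label_alt (labels : List Int) : Int := altLoop none labels

-- ===== PRECONDITION & SPEC =====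
def Spec_get_arm_label (labels : List Int) (out : Int) : Prop := out = get_arm_label_alt labels
instance (labels : List Int) (out : Int) : Decidable (Spec_get_arm_label labels out) := by unfold Spec_get_arm_label; infer_instance

-- ===== CLAIM (what is proved, stated in full; the proofs are below) =====
def Claim_equal_get_arm_label : Prop := ∀ (labels : List Int), Dom_get_arm_label labels → Spec_get_arm_label labels (get_arm_label labels)

-- ===== LEMMAS AND PROOFS =====

/-- proof-only characterisation: some adjacent pair of 1s exists -/
def hasPair : List Int → Bool
  | [] => false
  | x :: xs => (decide (x = 1 ∧ xs.head? = some 1)) || hasPair xs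

theorem altLoop_eq (l : List Int) : ∀ (p : Option Int),
    altLoop p l = if (p = some 1 ∧ l.head? = some 1) ∨ hasPair l = true then 1 else 0 := by
  induction l with
  | nil => intro p; simp [altLoop, hasPair]
  | cons x xs ih =>
    intro p
    rw [altLoop, ih (some x)]
    by_cases hp : p = some 1 ∧ x = 1 <;> simp [hasPair, hp]

theorem gb_head (l : List Int) : (pyGroupby l).head?.map Prod.fst = l.head? := by
  induction l with
  | nil => simp [pyGroupby]
  | cons x xs ih =>
    rw [pyGroupby]
    cases h : pyGroupby xs with
    | nil => simp
    | cons kv rest =>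
      obtain ⟨k, n⟩ := kv
      by_cases hxk : x = k <;> simp [hxk]

theorem gb_pos (l : List Int) : ∀ kv ∈ pyGroupby l, 1 ≤ kv.2 := by
  induction l with
  | nil => simp [pyGroupby]
  | cons x xs ih =>
    cases h : pyGroupby xs with
    | nil => simp [pyGroupby, h]
    | cons kv0 rest =>
      obtain ⟨k, n⟩ := kv0
      have hk := ih; rw [h] at hk
      have hg : pyGroupby (x :: xs) =
          if x = k then (k, n + 1) :: rest else (x, 1) :: (k, n) :: rest := by
        rw [pyGroupby, h]
      rw [hg]
      by_cases hxk : x = k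
      · rw [if_pos hxk]
        intro kv hkv
        rcases List.mem_cons.mp hkv with h1 | h1
        · subst h1; simp
        · exact hk kv (List.mem_cons_of_mem _ h1)
      · rw [if_neg hxk]
        intro kv hkv
        rcases List.mem_cons.mp hkv with h1 | h1
        · subst h1; simp
        · exact hk kv h1

theorem gb_any_eq_hasPair (l : List Int) :
    (pyGroupby l).any (fun kv => decide (kv.1 = 1) && decide (2 ≤ kv.2)) = hasPair l := by
  induction l with
  | nil => simp [pyGroupby, hasPair]
  | cons x xs ih =>
    cases h : pyGroupby xs with
    | nil =>
      have hh := gb_head xs; rw [h] at hh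
      have hxs : xs = [] := by
        cases xs with
        | nil => rfl
        | cons a as => simp at hh
      subst hxs
      simp [pyGroupby, hasPair]
    | cons kv0 rest =>
      obtain ⟨k, n⟩ := kv0
      have hh := gb_head xs; rw [h] at hh
      have hxh : xs.head? = some k := by simpa using hh.symm
      have hn : 1 ≤ n := gb_pos xs (k, n) (by rw [h]; simp)
      have hg : pyGroupby (x :: xs) =
          if x = k then (k, n + 1) :: rest else (x, 1) :: (k, n) :: rest := by
        rw [pyGroupby, h]
      rw [hg, hasPair, hxh, ← ih, h]
      by_cases hxk : x = k
      · subst hxk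
        rw [if_pos rfl]
        by_cases h1 : x = 1
        · subst h1; simp; omega
        · simp [h1]
      · rw [if_neg hxk]
        by_cases h1 : x = 1
        · subst h1
          have hk1 : ¬ (k = 1) := fun hk => hxk hk.symm
          simp [hk1]
        · simp [h1]

theorem foldl_max_ge (t : List Nat) : ∀ h : Nat,
    (2 ≤ t.foldl Nat.max h) ↔ (2 ≤ h ∨ t.any (fun n => decide (2 ≤ n)) = true) := by
  induction t with
  | nil => intro h; simp
  | cons a as ih =>
    intro h
    rw [List.foldl_cons, ih (Nat.max h a)]
    simp only [List.any_cons, Bool.or_eq_true, decide_eq_true_eq]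
    by_cases hP : (as.any fun n => decide (2 ≤ n)) = true <;> simp [hP]

theorem foldl_append_if_snd (l : List (Int × Nat)) : ∀ acc : List Nat,
    l.foldl (fun acc kv => if kv.1 = 1 then acc ++ [kv.2] else acc) acc
      = acc ++ (l.filter (fun kv => decide (kv.1 = 1))).map Prod.snd := by
  induction l with
  | nil => intro acc; simp
  | cons kv t ih =>
    intro acc
    rw [List.foldl_cons]
    by_cases hk : kv.1 = 1
    · rw [if_pos hk, ih, List.filter_cons]
      simp [hk]
    · rw [if_neg hk, ih, List.filter_cons]
      simp [hk]

theorem maxcheck (ll : List Nat) :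
    (match ll with
      | [] => (0 : Int)
      | h :: t => if 2 ≤ t.foldl Nat.max h then 1 else 0)
      = if ll.any (fun n => decide (2 ≤ n)) then 1 else 0 := by
  cases ll with
  | nil => simp
  | cons h t =>
    have hc : (2 ≤ t.foldl Nat.max h) ↔ ((h :: t).any (fun n => decide (2 ≤ n)) = true) := by
      rw [foldl_max_ge]
      simp [List.any_cons]
    simp only []
    split_ifs with h1 h2 <;> simp_all

theorem get_arm_label_eq_hasPair (l : List Int) :
    get_arm_label l = if hasPair l then 1 else 0 := by
  rw [get_arm_label]
  simp only [foldl_append_if_snd, List.nil_append, maxcheck, List.any_map, List.any_filter]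
  rw [← gb_any_eq_hasPair l]
  rfl

theorem alt_eq_hasPair (l : List Int) :
    get_arm_label_alt l = if hasPair l then 1 else 0 := by
  rw [get_arm_label_alt, altLoop_eq l none]
  simp

-- ===== VERDICT (by name: the statement is the Claim_ definition above) =====
theorem get_arm_label_spec : Claim_equal_get_arm_label := by
  intro labels _
  unfold Spec_get_arm_label
  rw [get_arm_label_eq_hasPair, alt_eq_hasPair]
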